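-- pv_equiv track=rewrite | github.com/python/pyperformance | pyperformance/benchmarks/__init__.py | expand_benchmark_name
-- ===== SOURCE A (Python) =====
-- def expand_benchmark_name(bm_name, bench_groups):
--     """Recursively expand name benchmark names.
--
--     Args:
--         bm_name: string naming a benchmark or benchmark group.
--
--     Yields:
--         Names of actual benchmarks, with all group names fully expanded.
--     """
--     expansion = bench_groups.get(bm_name)
--     if expansion:
--         for name in expansion:
--             for name in expand_benchmark_name(name, bench_groups):
--                 yield name
--     else:
--         yield bm_name
-- ===== SOURCE B (Python) =====
-- def expand_benchmark_name(bm_name, bench_groups):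
--     """Iterative re-implementation: explicit DFS stack instead of recursion."""
--     stack = [bm_name]
--     while stack:
--         name = stack.pop()
--         expansion = bench_groups.get(name)
--         if expansion:
--             stack.extend(reversed(expansion))
--         else:
--             yield name
-- ===== Notes on version B (the rewrite author's own statement) =====
-- stated objective: alternative
-- what changed: The recursive generator (one nested recursive call per group member) is replaced by an iterative depth-first traversal with an explicit stack: pop a name, push its group members reversed if its expansion is truthy, otherwise yield it.
import Mathlib
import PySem

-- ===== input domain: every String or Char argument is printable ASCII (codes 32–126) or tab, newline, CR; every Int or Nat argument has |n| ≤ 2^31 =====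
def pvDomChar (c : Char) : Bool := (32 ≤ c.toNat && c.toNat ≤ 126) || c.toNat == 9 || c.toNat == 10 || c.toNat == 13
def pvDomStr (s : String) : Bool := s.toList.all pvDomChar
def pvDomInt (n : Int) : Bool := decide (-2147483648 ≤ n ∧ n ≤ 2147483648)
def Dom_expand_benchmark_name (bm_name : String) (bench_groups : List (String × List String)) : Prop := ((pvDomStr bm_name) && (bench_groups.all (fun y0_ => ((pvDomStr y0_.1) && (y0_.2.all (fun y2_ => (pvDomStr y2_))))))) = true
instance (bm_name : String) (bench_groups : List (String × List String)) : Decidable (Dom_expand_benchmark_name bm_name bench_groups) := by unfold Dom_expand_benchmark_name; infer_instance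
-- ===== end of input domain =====

-- B replaces A's recursive generator by an explicit-stack depth-first loop (same yielded order);
-- the equivalence is about the (fully consumed) sequence of yielded names, returned as a list.

-- ===== PORT A =====
-- dict.get on the association list: first match (Python dicts have unique keys).
-- A recurses on names; under Pre_ (no reachable cycle) the recursion depth is at most
-- bench_groups.length + 1, which is the structural fuel used here (never exhausted under Pre_).
def goA (bg : List (String × List String)) : Nat → String → List String
  | 0, name => [name]
  | d + 1, name =>
    match List.lookup name bg with
    | some l => if l = [] then [name] else l.flatMap (fun n => goA bg d n)
    | none => [name]

def expand_benchmark_name (bm_name : String) (bench_groups : List (String × List String)) : List String :=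
  goA bench_groups (bench_groups.length + 1) bm_name

-- ===== PORT B =====
-- Explicit stack (head of the list = top of Python's stack, so Python's
-- stack.extend(reversed(expansion)) is prepending the expansion in order).
-- The while loop is encoded with fuel; under Pre_ the fuel below bounds the
-- number of loop iterations (number of nodes of the expansion tree) and is never exhausted.
def goB (bg : List (String × List String)) : Nat → List String → List String
  | 0, _ => []
  | _ + 1, [] => []
  | f + 1, name :: rest =>
    match List.lookup name bg with
    | some l => if l = [] then name :: goB bg f rest else goB bg f (l ++ rest)
    | none => name :: goB bg f rest

def fuelB (bg : List (String × List String)) : Nat :=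
  ((bg.map (fun p => p.2.length)).sum + 2) ^ (bg.length + 2)

def expand_benchmark_name_alt (bm_name : String) (bench_groups : List (String × List String)) : List String :=
  goB bench_groups (fuelB bench_groups) [bm_name]

-- ===== PRECONDITION & SPEC =====
-- successors of a name in the group graph (empty groups and non-keys have none)
def succsOf (bg : List (String × List String)) (k : String) : List String :=
  (List.lookup k bg).getD []

-- satReach bg n s = names reachable from the seed set s in at most n further edge steps
def satReach (bg : List (String × List String)) : Nat → List String → List String
  | 0, s => s
  | n + 1, s => satReach bg n ((s ++ s.flatMap (succsOf bg)).dedup)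

-- Pre_ excludes exactly the inputs on which A's recursion never terminates (Python raises
-- RecursionError): a cycle of nonempty groups reachable from bm_name; B's while loop does not
-- terminate there either.  Pre_ says: no name reachable from bm_name can reach itself.
def Pre_expand_benchmark_name (bm_name : String) (bench_groups : List (String × List String)) : Prop :=
  ∀ k ∈ bm_name :: satReach bench_groups bench_groups.length (succsOf bench_groups bm_name),
    k ∉ satReach bench_groups bench_groups.length (succsOf bench_groups k)

instance (bm_name : String) (bench_groups : List (String × List String)) : Decidable (Pre_expand_benchmark_name bm_name bench_groups) := by
  unfold Pre_expand_benchmark_name; infer_instance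

def pvWitness_expand_benchmark_name : String × (List (String × List String)) :=
  ("default", [("default", ["2to3", "micro"]), ("micro", ["spectral_norm", "nbody"])])

def Spec_expand_benchmark_name (bm_name : String) (bench_groups : List (String × List String)) (out : List String) : Prop := out = expand_benchmark_name_alt bm_name bench_groups
instance (bm_name : String) (bench_groups : List (String × List String)) (out : List String) : Decidable (Spec_expand_benchmark_name bm_name bench_groups out) := by unfold Spec_expand_benchmark_name; infer_instance

-- ===== CLAIM (what is proved, stated in full; the proofs are below) =====
def Claim_equal_expand_benchmark_name : Prop := ∀ (bm_name : String) (bench_groups : List (String × List String)), Dom_expand_benchmark_name bm_name bench_groups → Pre_expand_benchmark_name bm_name bench_groups → Spec_expand_benchmark_name bm_name bench_groups (expand_benchmark_name bm_name bench_groups)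

-- ===== LEMMAS AND PROOFS =====

-- cost of A's computation at depth d = number of loop iterations B spends on that name
def costA (bg : List (String × List String)) : Nat → String → Nat
  | 0, _ => 1
  | d + 1, name =>
    match List.lookup name bg with
    | some l => if l = [] then 1 else 1 + (l.map (costA bg d)).sum
    | none => 1

-- okA bg d name: depth fuel d suffices for A at name (the fuel-0 case of goA is never reached)
def okA (bg : List (String × List String)) : Nat → String → Bool
  | 0, name =>
    match List.lookup name bg with
    | some l => if l = [] then true else false
    | none => true
  | d + 1, name =>
    match List.lookup name bg with
    | some l => if l = [] then true else l.all (okA bg d)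
    | none => true

theorem goB_nil (bg : List (String × List String)) (f : Nat) : goB bg f [] = [] := by
  cases f <;> simp [goB]

theorem stepB (bg : List (String × List String)) :
    ∀ d name rest f, okA bg d name = true → costA bg d name ≤ f →
      goB bg f (name :: rest) = goA bg d name ++ goB bg (f - costA bg d name) rest := by
  intro d
  induction d with
  | zero =>
    intro name rest f hok hc
    simp only [okA] at hok
    simp only [costA] at hc ⊢
    obtain ⟨f', rfl⟩ : ∃ f', f = f' + 1 := ⟨f - 1, by omega⟩
    simp only [goA]
    cases hlk : List.lookup name bg with
    | none => simp [goB, hlk]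
    | some l =>
      rw [hlk] at hok
      by_cases hl : l = []
      · subst hl; simp [goB, hlk]
      · simp [hl] at hok
  | succ d ih =>
    intro name rest f hok hc
    have hstepList : ∀ (l : List String) (rest : List String) (f : Nat),
        (∀ x ∈ l, okA bg d x = true) → (l.map (costA bg d)).sum ≤ f →
        goB bg f (l ++ rest) = l.flatMap (goA bg d) ++ goB bg (f - (l.map (costA bg d)).sum) rest := by
      intro l
      induction l with
      | nil => intro rest f _ _; simp
      | cons x xs ihl =>
        intro rest f hall hsum
        simp only [List.map_cons, List.sum_cons] at hsum ⊢
        have hx : costA bg d x ≤ f := by omega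
        rw [List.cons_append, ih x (xs ++ rest) f (hall x (by simp)) hx]
        rw [ihl rest (f - costA bg d x) (fun y hy => hall y (by simp [hy])) (by omega)]
        rw [List.flatMap_cons, List.append_assoc, Nat.sub_sub]
    simp only [okA] at hok
    cases hlk : List.lookup name bg with
    | none =>
      obtain ⟨f', rfl⟩ : ∃ f', f = f' + 1 := by
        simp only [costA, hlk] at hc; exact ⟨f - 1, by omega⟩
      simp [goB, goA, costA, hlk]
    | some l =>
      rw [hlk] at hok
      by_cases hl : l = []
      · subst hl
        obtain ⟨f', rfl⟩ : ∃ f', f = f' + 1 := by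
          simp only [costA, hlk] at hc; simp at hc; exact ⟨f - 1, by omega⟩
        simp [goB, goA, costA, hlk]
      · simp only [if_neg hl, List.all_eq_true] at hok
        simp only [costA, hlk, if_neg hl] at hc
        obtain ⟨f', rfl⟩ : ∃ f', f = f' + 1 := ⟨f - 1, by omega⟩
        have h1 : goB bg (f' + 1) (name :: rest) = goB bg f' (l ++ rest) := by
          simp [goB, hlk, hl]
        have hc' : costA bg (d + 1) name = 1 + (l.map (costA bg d)).sum := by
          simp [costA, hlk, hl]
        rw [h1, hstepList l rest f' hok (by omega), hc']
        have hf : f' + 1 - (1 + (l.map (costA bg d)).sum) = f' - (l.map (costA bg d)).sum := by omega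
        rw [hf]
        simp [goA, hlk, hl]

-- every group value is no longer than the total number of members
theorem lookup_len_le (bg : List (String × List String)) (name : String) (l : List String)
    (h : List.lookup name bg = some l) : l.length ≤ (bg.map (fun p => p.2.length)).sum := by
  induction bg with
  | nil => simp [List.lookup] at h
  | cons p t ih =>
    obtain ⟨k, v⟩ := p
    by_cases hk : (name == k) = true
    · simp only [List.lookup, hk] at h
      injection h with h; subst h
      simp
    · simp only [List.lookup, hk] at h
      have := ih h
      simp
      omega

theorem costA_le (bg : List (String × List String)) :
    ∀ d name, costA bg d name ≤ ((bg.map (fun p => p.2.length)).sum + 2) ^ d := by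
  intro d
  set S := (bg.map (fun p => p.2.length)).sum with hS
  induction d with
  | zero => intro name; simp [costA]
  | succ d ih =>
    intro name
    have hpow : 1 ≤ (S + 2) ^ d := Nat.one_le_pow _ _ (by omega)
    simp only [costA]
    cases hlk : List.lookup name bg with
    | none => calc 1 ≤ (S + 2) ^ d := hpow
                _ ≤ (S + 2) ^ (d + 1) := Nat.pow_le_pow_right (by omega) (by omega)
    | some l =>
      by_cases hl : l = []
      · simp only [if_pos hl]
        calc 1 ≤ (S + 2) ^ d := hpow
          _ ≤ (S + 2) ^ (d + 1) := Nat.pow_le_pow_right (by omega) (by omega)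
      · simp only [if_neg hl]
        have hsum : (l.map (costA bg d)).sum ≤ l.length * ((S + 2) ^ d) := by
          have : ∀ x ∈ l.map (costA bg d), x ≤ (S + 2) ^ d := by
            intro x hx
            obtain ⟨y, _, rfl⟩ := List.mem_map.mp hx
            exact ih y
          calc (l.map (costA bg d)).sum ≤ (l.map (costA bg d)).length • ((S + 2) ^ d) :=
                List.sum_le_card_nsmul _ _ this
            _ = l.length * ((S + 2) ^ d) := by simp [smul_eq_mul]
        have hlen : l.length ≤ S := lookup_len_le bg name l hlk
        have hmul : l.length * ((S + 2) ^ d) ≤ S * ((S + 2) ^ d) :=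
          Nat.mul_le_mul_right _ hlen
        have : (S + 2) ^ (d + 1) = S * ((S + 2) ^ d) + 2 * ((S + 2) ^ d) := by ring
        omega

-- okA is monotone in the depth fuel
theorem okA_mono (bg : List (String × List String)) :
    ∀ d name, okA bg d name = true → okA bg (d + 1) name = true := by
  intro d
  induction d with
  | zero =>
    intro name h
    simp only [okA] at h ⊢
    cases hlk : List.lookup name bg with
    | none => rfl
    | some l =>
      rw [hlk] at h
      by_cases hl : l = [] <;> simp [hl] at h ⊢
  | succ d ih =>
    intro name h
    simp only [okA] at h ⊢
    cases hlk : List.lookup name bg with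
    | none => rfl
    | some l =>
      rw [hlk] at h
      by_cases hl : l = []
      · simp [hl]
      · simp only [if_neg hl, List.all_eq_true] at h ⊢
        exact fun x hx => ih x (h x hx)

-- a name with a truthy expansion is a key
theorem lookup_mem_keys (bg : List (String × List String)) (name : String) (l : List String)
    (h : List.lookup name bg = some l) : name ∈ bg.map Prod.fst := by
  induction bg with
  | nil => simp [List.lookup] at h
  | cons p t ih =>
    obtain ⟨k, v⟩ := p
    by_cases hk : (name == k) = true
    · rw [List.map_cons]
      have hnk : name = k := beq_iff_eq.mp hk
      subst hnk
      exact List.mem_cons_self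
    · simp only [List.lookup, hk] at h
      rw [List.map_cons]
      exact List.mem_cons_of_mem _ (ih h)

-- ¬ okA d name yields a chain of d edges through names that are all keys
theorem notOk_chain (bg : List (String × List String)) :
    ∀ d name, okA bg d name = false →
      ∃ p : List String, p.length = d ∧
        List.IsChain (fun a b => b ∈ succsOf bg a) (name :: p) ∧
        ∀ x ∈ name :: p, x ∈ bg.map Prod.fst := by
  intro d
  induction d with
  | zero =>
    intro name h
    simp only [okA] at h
    cases hlk : List.lookup name bg with
    | none => rw [hlk] at h; simp at h
    | some l =>
      rw [hlk] at h
      by_cases hl : l = []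
      · simp [hl] at h
      · exact ⟨[], rfl, by simp, by
          intro x hx
          simp at hx
          subst hx
          exact lookup_mem_keys _ _ _ hlk⟩
  | succ d ih =>
    intro name h
    simp only [okA] at h
    cases hlk : List.lookup name bg with
    | none => rw [hlk] at h; simp at h
    | some l =>
      rw [hlk] at h
      by_cases hl : l = []
      · simp [hl] at h
      · simp only [if_neg hl, List.all_eq_false] at h
        obtain ⟨x, hxl, hxf⟩ := h
        rw [Bool.not_eq_true] at hxf
        obtain ⟨p, hlen, hchain, hkeys⟩ := ih x hxf
        refine ⟨x :: p, by simp [hlen], ?_, ?_⟩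
        · exact List.isChain_cons_cons.mpr ⟨by simp [succsOf, hlk]; exact hxl, hchain⟩
        · intro y hy
          rcases List.mem_cons.mp hy with rfl | hy'
          · exact lookup_mem_keys bg y l hlk
          · exact hkeys y hy'

-- satReach: seed monotonicity (membership-wise)
theorem satReach_mono_seed (bg : List (String × List String)) :
    ∀ n s s', (∀ x ∈ s, x ∈ s') → ∀ x ∈ satReach bg n s, x ∈ satReach bg n s' := by
  intro n
  induction n with
  | zero => intro s s' hsub x hx; exact hsub x hx
  | succ n ih =>
    intro s s' hsub x hx
    simp only [satReach] at hx ⊢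
    refine ih _ _ ?_ x hx
    intro y hy
    simp only [List.mem_dedup, List.mem_append, List.mem_flatMap] at hy ⊢
    rcases hy with hy | ⟨z, hz, hyz⟩
    · exact Or.inl (hsub y hy)
    · exact Or.inr ⟨z, hsub z hz, hyz⟩

-- the seed is contained in every satReach of it
theorem satReach_seed (bg : List (String × List String)) :
    ∀ n s, ∀ x ∈ s, x ∈ satReach bg n s := by
  intro n
  induction n with
  | zero => intro s x hx; exact hx
  | succ n ih =>
    intro s x hx
    simp only [satReach]
    exact ih _ x (by simp [List.mem_dedup]; left; exact hx)

-- satReach is monotone in the step count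
theorem satReach_mono_n (bg : List (String × List String)) :
    ∀ n s, ∀ x ∈ satReach bg n s, x ∈ satReach bg (n + 1) s := by
  intro n
  induction n with
  | zero =>
    intro s x hx
    simp only [satReach]
    simp [List.mem_dedup]
    left; exact hx
  | succ n ih =>
    intro s x hx
    simp only [satReach] at hx ⊢
    exact ih _ x hx

theorem satReach_mono_le (bg : List (String × List String)) (n m : Nat) (h : n ≤ m) :
    ∀ s, ∀ x ∈ satReach bg n s, x ∈ satReach bg m s := by
  induction m with
  | zero => intro s x hx; have : n = 0 := by omega
            subst this; exact hx
  | succ m ih =>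
    intro s x hx
    by_cases hn : n = m + 1
    · subst hn; exact hx
    · exact satReach_mono_n bg m s x (ih (by omega) s x hx)

-- stepping into a member: satReach from a member's successors sits inside satReach from the seed
theorem satReach_step (bg : List (String × List String)) (m : Nat) (s : List String) (y : String)
    (hy : y ∈ s) : ∀ x ∈ satReach bg m (succsOf bg y), x ∈ satReach bg (m + 1) s := by
  intro x hx
  have hsub : ∀ z ∈ succsOf bg y, z ∈ (s ++ s.flatMap (succsOf bg)).dedup := by
    intro z hz
    simp [List.mem_dedup, List.mem_append, List.mem_flatMap]
    exact Or.inr ⟨y, hy, hz⟩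
  have : x ∈ satReach bg m ((s ++ s.flatMap (succsOf bg)).dedup) :=
    satReach_mono_seed bg m _ _ hsub x hx
  simpa [satReach] using this

-- every element of a chain from x is reachable from x's successors
theorem chain_satReach (bg : List (String × List String)) :
    ∀ (p : List String) (x : String), List.IsChain (fun a b => b ∈ succsOf bg a) (x :: p) →
      ∀ z ∈ p, z ∈ satReach bg (p.length - 1) (succsOf bg x) := by
  intro p
  induction p with
  | nil => intro x _ z hz; simp at hz
  | cons y rest ih =>
    intro x hchain z hz
    obtain ⟨hxy, hrest⟩ := List.isChain_cons_cons.mp hchain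
    · rcases List.mem_cons.mp hz with rfl | hz'
      · exact satReach_seed bg _ _ z hxy
      · have hrec := ih y hrest z hz'
        have hne : rest ≠ [] := by rintro rfl; simp at hz'
        have hlen : rest.length - 1 + 1 = rest.length := by
          cases rest; · exact absurd rfl hne
          · simp
        have := satReach_step bg (rest.length - 1) (succsOf bg x) y hxy z hrec
        rw [hlen] at this
        simpa using this

-- a non-nodup list has a repeated element with an explicit decomposition
theorem dup_decomp {α : Type} [DecidableEq α] :
    ∀ (l : List α), ¬ l.Nodup → ∃ a l1 l2 l3, l = l1 ++ a :: l2 ++ a :: l3 := by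
  intro l
  induction l with
  | nil => intro h; exact absurd List.nodup_nil h
  | cons x t ih =>
    intro h
    by_cases hx : x ∈ t
    · obtain ⟨s, u, rfl⟩ := List.append_of_mem hx
      exact ⟨x, [], s, u, by simp⟩
    · have ht : ¬ t.Nodup := by
        intro hn
        exact h (List.nodup_cons.mpr ⟨hx, hn⟩)
      obtain ⟨a, l1, l2, l3, rfl⟩ := ih ht
      exact ⟨a, x :: l1, l2, l3, by simp⟩

-- pigeonhole: a list longer than the key list with all elements keys has a duplicate
theorem pigeon {α : Type} [DecidableEq α] (c keys : List α)
    (hsub : ∀ x ∈ c, x ∈ keys) (hlen : keys.length < c.length) : ¬ c.Nodup := by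
  intro hnd
  have h1 : c.toFinset.card = c.length := List.toFinset_card_of_nodup hnd
  have h2 : c.toFinset ⊆ keys.toFinset := by
    intro x hx
    exact List.mem_toFinset.mpr (hsub x (List.mem_toFinset.mp hx))
  have h3 : keys.toFinset.card ≤ keys.length := List.toFinset_card_le keys
  have := Finset.card_le_card h2
  omega

-- under Pre_, depth fuel = number of groups suffices for A at bm_name
theorem okA_of_pre (bm_name : String) (bg : List (String × List String))
    (hpre : Pre_expand_benchmark_name bm_name bg) : okA bg bg.length bm_name = true := by
  cases hok : okA bg bg.length bm_name with
  | true => rfl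
  | false =>
    exfalso
    obtain ⟨p, hlen, hchain, hkeys⟩ := notOk_chain bg bg.length bm_name hok
    set K := bg.length with hK
    -- the chain bm_name :: p has K+1 elements, all keys; keys has length K
    have hnodup : ¬ (bm_name :: p).Nodup := by
      refine pigeon (bm_name :: p) (bg.map Prod.fst) hkeys ?_
      simp only [List.length_map, List.length_cons, hlen]
      omega
    obtain ⟨a, l1, l2, l3, hdec⟩ := dup_decomp (bm_name :: p) hnodup
    -- a appears twice; extract the cycle chain a → … → a of length l2.length + 1 ≤ K
    have hdec' : bm_name :: p = l1 ++ a :: (l2 ++ a :: l3) := by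
      rw [hdec]; simp
    have hchain1 : List.IsChain (fun x y => y ∈ succsOf bg x) (l1 ++ a :: (l2 ++ a :: l3)) :=
      hdec' ▸ hchain
    have hchain2 : List.IsChain (fun x y => y ∈ succsOf bg x) (a :: (l2 ++ a :: l3)) :=
      (List.isChain_split.mp hchain1).2
    have hchain3 : List.IsChain (fun x y => y ∈ succsOf bg x) (a :: (l2 ++ [a])) :=
      (List.isChain_cons_split.mp hchain2).1
    have hlens : l1.length + 1 + l2.length + 1 + l3.length = K + 1 := by
      have := congrArg List.length hdec
      simp at this
      simp [hlen] at this ⊢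
      omega
    -- a reaches itself within K steps
    have hmem : a ∈ satReach bg ((l2 ++ [a]).length - 1) (succsOf bg a) :=
      chain_satReach bg (l2 ++ [a]) a hchain3 a (by simp)
    have hself : a ∈ satReach bg K (succsOf bg a) := by
      refine satReach_mono_le bg _ K (by simp; omega) _ a hmem
    -- a is bm_name or reachable from bm_name
    have hin : a ∈ bm_name :: satReach bg K (succsOf bg bm_name) := by
      have ha_mem : a ∈ bm_name :: p := by rw [hdec]; simp
      rcases List.mem_cons.mp ha_mem with rfl | hap
      · simp
      · have : a ∈ satReach bg (p.length - 1) (succsOf bg bm_name) :=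
          chain_satReach bg p bm_name hchain a hap
        have : a ∈ satReach bg K (succsOf bg bm_name) :=
          satReach_mono_le bg _ K (by omega) _ a this
        simp [this]
    exact hpre a hin hself

-- ===== VERDICT (by name: the statement is the Claim_ definition above) =====
theorem expand_benchmark_name_spec : Claim_equal_expand_benchmark_name := by
  intro bm_name bg _ hpre
  unfold Spec_expand_benchmark_name expand_benchmark_name expand_benchmark_name_alt
  set K := bg.length with hK
  set S := (bg.map (fun p => p.2.length)).sum with hS
  have hok : okA bg (K + 1) bm_name = true := okA_mono bg K bm_name (okA_of_pre bm_name bg hpre)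
  have hcost : costA bg (K + 1) bm_name ≤ fuelB bg := by
    calc costA bg (K + 1) bm_name ≤ (S + 2) ^ (K + 1) := costA_le bg (K + 1) bm_name
      _ ≤ (S + 2) ^ (K + 2) := Nat.pow_le_pow_right (by omega) (by omega)
      _ = fuelB bg := by rw [fuelB]
  have := stepB bg (K + 1) bm_name [] (fuelB bg) hok hcost
  rw [this, goB_nil, List.append_nil]
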